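-- pv_equiv track=rewrite | github.com/Mirretta/Call-of-Earth | achievements.py | update_progress
-- ===== SOURCE A (Python) =====
-- def update_progress(num1,num2,num3,num4,num5):
--     achv_progression = [[15,30,50],[50,75,100],[10,15,20],[1,2,3],[5,10,20]]
--
--     n1 = n2 = n3 = n4 = n5 = None
--
--     for index, achv in enumerate(achv_progression[0]):
--         if num1 < achv:
--             n1 = index
--             break
--
--     if n1 == None: n1 = 3
--
--     for index, achv in enumerate(achv_progression[1]):
--         if  num2 < achv:
--             n2 = index
--             break
--
--     if n2 == None: n2 = 3
--
--     for index, achv in enumerate(achv_progression[2]):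
--         if num3 < achv:
--             n3 = index
--             break
--
--     if n3 == None: n3 = 3
--
--     for index, achv in enumerate(achv_progression[3]):
--         if num4 < achv:
--             n4 = index
--             break
--
--     if n4 == None: n4 = 3
--
--     for index, achv in enumerate(achv_progression[4]):
--         if num5 < achv:
--             n5 = index
--             break
--
--     if n5 == None: n5 = 3
--
--     return n1,n2,n3,n4,n5
-- ===== SOURCE B (Python) =====
-- import bisect
--
-- def update_progress(num1, num2, num3, num4, num5):
--     table = [[15, 30, 50], [50, 75, 100], [10, 15, 20], [1, 2, 3], [5, 10, 20]]
--     return tuple(bisect.bisect_right(thresholds, num)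
--                  for thresholds, num in zip(table, (num1, num2, num3, num4, num5)))
-- ===== Notes on version B (the rewrite author's own statement) =====
-- stated objective: idiomatic
-- what changed: Replaces five copy-pasted early-break linear scans with None sentinels by one table-driven pass: zip the five threshold lists with the five numbers and compute each tier as bisect.bisect_right(thresholds, num), which equals the first index whose threshold exceeds num (or 3 when none does).
import Mathlib
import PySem

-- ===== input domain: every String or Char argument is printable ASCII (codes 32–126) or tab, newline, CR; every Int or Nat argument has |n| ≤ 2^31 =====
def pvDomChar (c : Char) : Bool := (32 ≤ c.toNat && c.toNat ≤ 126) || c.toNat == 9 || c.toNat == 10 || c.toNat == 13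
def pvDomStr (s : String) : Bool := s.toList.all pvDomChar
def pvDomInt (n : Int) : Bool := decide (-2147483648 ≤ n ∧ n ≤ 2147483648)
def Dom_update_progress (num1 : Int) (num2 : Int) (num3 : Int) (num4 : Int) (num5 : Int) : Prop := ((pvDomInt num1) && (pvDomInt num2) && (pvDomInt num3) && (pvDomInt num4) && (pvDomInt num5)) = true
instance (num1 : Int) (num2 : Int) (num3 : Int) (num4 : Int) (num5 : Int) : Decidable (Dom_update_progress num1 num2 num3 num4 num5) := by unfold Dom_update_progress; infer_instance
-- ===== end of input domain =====

-- B: one table-driven pass (zip thresholds with numbers, tier = bisect_right) instead of five duplicated early-break scans; idiomatic, not faster.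


-- ===== PORT A =====
-- loop 'for index, achv in enumerate(ts): if num < achv: n = index; break' → first matching index, none if no break
def pvScanA (pairs : List (Int × Int)) (num : Int) : Option Int :=
  match pairs with
  | [] => none
  | (i, a) :: rest => if num < a then some i else pvScanA rest num

def update_progress (num1 : Int) (num2 : Int) (num3 : Int) (num4 : Int) (num5 : Int) : Int × Int × Int × Int × Int :=
  let achv_progression : List (List Int) := [[15,30,50],[50,75,100],[10,15,20],[1,2,3],[5,10,20]]
  let n1 := (pvScanA (PySem.List.enumerate (achv_progression.getD 0 [])) num1).getD 3
  let n2 := (pvScanA (PySem.List.enumerate (achv_progression.getD 1 [])) num2).getD 3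
  let n3 := (pvScanA (PySem.List.enumerate (achv_progression.getD 2 [])) num3).getD 3
  let n4 := (pvScanA (PySem.List.enumerate (achv_progression.getD 3 [])) num4).getD 3
  let n5 := (pvScanA (PySem.List.enumerate (achv_progression.getD 4 [])) num5).getD 3
  (n1, n2, n3, n4, n5)

-- ===== PORT B =====
-- bisect.bisect_right on a sorted list = number of elements ≤ x (ported as takeWhile length; exact on sorted lists)
def pvBisectRight (l : List Int) (x : Int) : Int :=
  Int.ofNat (l.takeWhile (fun t => decide (t ≤ x))).length

def update_progress_alt (num1 : Int) (num2 : Int) (num3 : Int) (num4 : Int) (num5 : Int) : Int × Int × Int × Int × Int :=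
  let table : List (List Int) := [[15,30,50],[50,75,100],[10,15,20],[1,2,3],[5,10,20]]
  let nums : List Int := [num1, num2, num3, num4, num5]
  match (table.zip nums).map (fun p => pvBisectRight p.1 p.2) with
  | [a, b, c, d, e] => (a, b, c, d, e)
  | _ => (0, 0, 0, 0, 0)

-- ===== PRECONDITION & SPEC =====
def Spec_update_progress (num1 : Int) (num2 : Int) (num3 : Int) (num4 : Int) (num5 : Int) (out : Int × Int × Int × Int × Int) : Prop := out = update_progress_alt num1 num2 num3 num4 num5
instance (num1 : Int) (num2 : Int) (num3 : Int) (num4 : Int) (num5 : Int) (out : Int × Int × Int × Int × Int) : Decidable (Spec_update_progress num1 num2 num3 num4 num5 out) := by unfold Spec_update_progress; infer_instance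

-- ===== CLAIM (what is proved, stated in full; the proofs are below) =====
def Claim_equal_update_progress : Prop := ∀ (num1 : Int) (num2 : Int) (num3 : Int) (num4 : Int) (num5 : Int), Dom_update_progress num1 num2 num3 num4 num5 → Spec_update_progress num1 num2 num3 num4 num5 (update_progress num1 num2 num3 num4 num5)

-- ===== LEMMAS AND PROOFS =====

-- ===== VERDICT (by name: the statement is the Claim_ definition above) =====
-- one tier: the early-break scan with fallback 3 equals bisect_right on a sorted 3-element list
theorem pvTier_eq (x a b c : Int) :
    (pvScanA [(0, a), (1, b), (2, c)] x).getD 3 = pvBisectRight [a, b, c] x := by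
  simp only [pvScanA, pvBisectRight, List.takeWhile_cons, List.takeWhile_nil,
    decide_eq_true_eq]
  split_ifs <;> simp_all <;> omega

theorem update_progress_spec : Claim_equal_update_progress := by
  intro num1 num2 num3 num4 num5 _
  unfold Spec_update_progress update_progress update_progress_alt
  simp only [PySem.List.enumerate_cons, PySem.List.enumerate_nil, List.zip, List.zipWith,
    List.map, List.getD, Int.reduceAdd, List.getElem?_cons_zero, List.getElem?_cons_succ,
    Option.getD_some]
  rw [pvTier_eq, pvTier_eq, pvTier_eq, pvTier_eq, pvTier_eq]
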